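-- pv_equiv track=rewrite | github.com/handsomeTowne/mariopants11src | data.py | int_block
-- ===== SOURCE A (Python) =====
-- def int_block(d):
--     s = "  { "
--     for i in range(0,len(d)):
--         s += ("%6d," % (d[i]))
--         if (i & 15) == 15:
--             s += "\n    "
--     s += "}"
--     return s
-- ===== SOURCE B (Python) =====
-- def int_block(d):
--     parts = ["".join('%6d,' % x for x in d[i:i + 16])
--              + ("\n    " if len(d) - i >= 16 else "")
--              for i in range(0, len(d), 16)]
--     return "  { " + "".join(parts) + "}"
-- ===== Notes on version B (the rewrite author's own statement) =====
-- stated objective: alternative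
-- what changed: B builds a list of per-chunk strings (one join per 16-element slice, with the newline appended to each full chunk, full = at least 16 elements remain at the chunk start) and joins them around the braces, instead of A's flat index loop accumulating into one string with the i & 15 bit test.
import Mathlib
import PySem

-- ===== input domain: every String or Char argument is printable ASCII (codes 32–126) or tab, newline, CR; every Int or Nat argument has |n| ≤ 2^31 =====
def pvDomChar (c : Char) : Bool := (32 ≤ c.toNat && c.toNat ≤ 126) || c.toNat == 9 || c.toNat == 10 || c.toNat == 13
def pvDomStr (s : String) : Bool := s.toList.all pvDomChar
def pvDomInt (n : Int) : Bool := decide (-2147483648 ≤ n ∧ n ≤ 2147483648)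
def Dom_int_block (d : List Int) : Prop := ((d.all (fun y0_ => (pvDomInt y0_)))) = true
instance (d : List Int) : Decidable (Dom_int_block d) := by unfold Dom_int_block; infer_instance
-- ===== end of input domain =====

-- B builds a list of per-chunk strings (one per 16-element slice, newline appended to each
-- full chunk) and joins them, instead of A's flat index loop with the `i & 15` bit test; objective: alternative.

-- shared rendering of Python's '%6d,' % n (right-justified to width 6 with spaces, then a comma)
def pvFmt6 (n : Int) : String :=
  String.ofList (List.replicate (6 - (PySem.Int.toChars n).length) ' ') ++ PySem.Int.toStr n ++ ","

-- ===== PORT A =====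
def int_block (d : List Int) : String :=
  let s := "  { "
  let s := (PySem.List.pyRange 0 (d.length : Int) 1).foldl
    (fun s i =>
      let s := s ++ pvFmt6 (PySem.List.pyGetD d i 0)
      if Int.land i 15 == 15 then s ++ "\n    " else s) s
  s ++ "}"

-- ===== PORT B =====
def int_block_alt (d : List Int) : String :=
  let parts := (PySem.List.pyRange 0 (d.length : Int) 16).map
    (fun i =>
      PySem.Str.join "" ((PySem.List.slice d (some i) (some (i + 16))).map pvFmt6)
        ++ (if (d.length : Int) - i ≥ 16 then "\n    " else ""))
  "  { " ++ PySem.Str.join "" parts ++ "}"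

-- ===== PRECONDITION & SPEC =====
def Spec_int_block (d : List Int) (out : String) : Prop := out = int_block_alt d
instance (d : List Int) (out : String) : Decidable (Spec_int_block d out) := by unfold Spec_int_block; infer_instance

-- ===== CLAIM (what is proved, stated in full; the proofs are below) =====
def Claim_equal_int_block : Prop := ∀ (d : List Int), Dom_int_block d → Spec_int_block d (int_block d)

-- ===== LEMMAS AND PROOFS =====

-- common description of A's emitted text: process the remaining elements, k = absolute index of the head
def pvLoop : Nat → List Int → String → String
  | _, [], s => s
  | k, x :: r, s => pvLoop (k+1) r (if k % 16 = 15 then (s ++ pvFmt6 x) ++ "\n    " else s ++ pvFmt6 x)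

theorem pvLoop_cons (k : Nat) (x : Int) (r : List Int) (s : String) :
    pvLoop k (x :: r) s
      = pvLoop (k+1) r (if k % 16 = 15 then (s ++ pvFmt6 x) ++ "\n    " else s ++ pvFmt6 x) := rfl

theorem pv_join_empty_cons (a : String) (l : List String) :
    PySem.Str.join "" (a :: l) = a ++ PySem.Str.join "" l := by
  cases l with
  | nil =>
      show String.ofList ([].intercalate [a.toList]) = a ++ String.ofList ([].intercalate [])
      simp [List.intercalate]
  | cons b t =>
      show String.ofList (PySem.Chars.join [] (a.toList :: b.toList :: t.map String.toList)) = _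
      rw [PySem.Chars.join_cons_cons]
      simp [String.ofList_append, PySem.Str.join]

theorem pv_join_empty_nil : PySem.Str.join "" ([] : List String) = "" := by
  simp [PySem.Str.join, PySem.Chars.join_nil]

theorem pv_land15 (k : Nat) : (Int.land (k : Int) 15 == 15) = decide (k % 16 = 15) := by
  have h1 : Int.land (k : Int) 15 = ((k &&& 15 : Nat) : Int) := rfl
  have h2 : k &&& 15 = k % 16 := by
    have := Nat.and_two_pow_sub_one_eq_mod k 4
    norm_num at this
    exact this
  rw [h1, h2]
  by_cases h : k % 16 = 15
  · simp [h]
  · simp only [h, decide_false]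
    simp only [beq_eq_false_iff_ne, ne_eq]
    omega

-- A's flat loop from index k onward is pvLoop on the suffix
theorem pv_loopA_eq (d : List Int) (n : Nat) : ∀ (k : Nat) (s : String),
    d.length - k = n → k ≤ d.length →
    (PySem.List.pyRange (k : Int) (d.length : Int) 1).foldl
      (fun s i =>
        let s := s ++ pvFmt6 (PySem.List.pyGetD d i 0)
        if Int.land i 15 == 15 then s ++ "\n    " else s) s
    = pvLoop k (d.drop k) s := by
  induction n with
  | zero =>
      intro k s hn hk
      have hke : k = d.length := by omega
      rw [PySem.List.pyRange_one_eq_nil (by exact_mod_cast le_of_eq hke.symm)]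
      rw [List.drop_of_length_le (le_of_eq hke.symm)]
      rfl
  | succ n ih =>
      intro k s hn hk
      have hklt : k < d.length := by omega
      rw [PySem.List.pyRange_one_cons (by exact_mod_cast hklt)]
      rw [List.foldl_cons]
      have hget : PySem.List.pyGetD d (k : Int) 0 = d[k] := by
        simp [List.getElem?_eq_getElem hklt]
      have hdrop : d.drop k = d[k] :: d.drop (k+1) := List.drop_eq_getElem_cons hklt
      rw [hdrop, pvLoop_cons]
      have hcast : ((k : Int) + 1) = ((k + 1 : Nat) : Int) := by push_cast; ring
      rw [hcast]
      simp only [hget, pv_land15]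
      by_cases h : k % 16 = 15
      · simp only [h, decide_true, if_true]
        exact ih (k+1) _ (by omega) (by omega)
      · simp only [h, decide_false, if_false]
        exact ih (k+1) _ (by omega) (by omega)

-- a partial (< 16 elements) trailing chunk: each element appended, no newline
theorem pv_chunk_partial (m : Nat) : ∀ (c : List Int) (i : Nat) (s : String),
    i + c.length ≤ 15 →
    pvLoop (16*m + i) c s = s ++ PySem.Str.join "" (c.map pvFmt6) := by
  intro c
  induction c with
  | nil =>
      intro i s _
      simp [pvLoop, pv_join_empty_nil, String.append_empty]
  | cons x r ih =>
      intro i s h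
      have hl : i ≤ 14 := by simp at h; omega
      have hi : ¬ ((16*m + i) % 16 = 15) := by omega
      rw [pvLoop_cons, if_neg (by exact hi), show 16*m + i + 1 = 16*m + (i+1) by omega,
        ih (i+1) _ (by simp at h ⊢; omega)]
      rw [List.map_cons, pv_join_empty_cons, ← String.append_assoc]

-- a full chunk of 16: its 16 texts, then the newline, then continue at the next chunk boundary
theorem pv_chunk_full (m : Nat) : ∀ (c : List Int) (i : Nat) (rest : List Int) (s : String),
    i ≤ 15 → i + c.length = 16 →
    pvLoop (16*m + i) (c ++ rest) s
      = pvLoop (16*(m+1)) rest ((s ++ PySem.Str.join "" (c.map pvFmt6)) ++ "\n    ") := by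
  intro c
  induction c with
  | nil => intro i rest s hi h; simp at h; omega
  | cons x r ih =>
      intro i rest s hi h
      by_cases hlast : i = 15
      · have hr : r = [] := by
          have : r.length = 0 := by simp at h; omega
          exact List.length_eq_zero_iff.mp this
        subst hr hlast
        have hmod : (16*m + 15) % 16 = 15 := by omega
        rw [List.cons_append, List.nil_append, pvLoop_cons, if_pos hmod,
          show 16*m + 15 + 1 = 16*(m+1) by omega]
        rw [List.map_cons, List.map_nil, pv_join_empty_cons, pv_join_empty_nil,
          String.append_empty]
      · have hi14 : i ≤ 14 := by omega
        have hmod : ¬ ((16*m + i) % 16 = 15) := by omega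
        rw [List.cons_append, pvLoop_cons, if_neg (by exact hmod),
          show 16*m + i + 1 = 16*m + (i+1) by omega,
          ih (i+1) rest _ (by omega) (by simp at h ⊢; omega)]
        rw [List.map_cons, pv_join_empty_cons, ← String.append_assoc]

-- step-16 range, cons form
theorem pv_pyRange16_cons (a b : Int) (h : a < b) :
    PySem.List.pyRange a b 16 = a :: PySem.List.pyRange (a + 16) b 16 := by
  rw [PySem.List.pyRange_of_pos a b (by norm_num), PySem.List.pyRange_of_pos (a+16) b (by norm_num)]
  have hsplit : (b - a + 16 - 1) / 16 = (b - a - 1) / 16 + 1 := by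
    have : b - a + 16 - 1 = (b - a - 1) + 1 * 16 := by ring
    rw [this, Int.add_mul_ediv_right _ _ (by norm_num)]
  by_cases hb : a + 16 < b
  · rw [if_pos h, if_pos hb, hsplit]
    have ht : ((b - a - 1) / 16 + 1).toNat = ((b - (a + 16) + 16 - 1) / 16).toNat + 1 := by
      have heq : b - (a + 16) + 16 - 1 = b - a - 1 := by ring
      have hnn : 0 ≤ (b - a - 1) / 16 := Int.ediv_nonneg (by omega) (by norm_num)
      rw [heq]; omega
    rw [ht, List.range_succ_eq_map, List.map_cons]
    simp only [Nat.cast_zero, mul_zero, add_zero, List.map_map]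
    congr 1
    apply List.map_congr_left
    intro k _
    simp only [Function.comp_apply]
    push_cast
    ring
  · rw [if_pos h, if_neg hb, hsplit]
    have ht : ((b - a - 1) / 16 + 1).toNat = 1 := by
      have : (b - a - 1) / 16 = 0 := by omega
      omega
    rw [ht]
    simp

theorem pv_pyRange16_nil (a b : Int) (h : b ≤ a) : PySem.List.pyRange a b 16 = [] := by
  rw [PySem.List.pyRange_of_pos a b (by norm_num)]
  rw [if_neg (by omega)]
  simp

-- A's flat loop at a chunk boundary computes B's joined chunk texts
theorem pv_loop_eq_join (n : Nat) : ∀ (d : List Int) (m : Nat) (s : String),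
    d.length ≤ 16*m + n →
    pvLoop (16*m) (d.drop (16*m)) s
      = s ++ PySem.Str.join "" ((PySem.List.pyRange ((16*m : Nat) : Int) (d.length : Int) 16).map
          (fun i =>
            PySem.Str.join "" ((PySem.List.slice d (some i) (some (i + 16))).map pvFmt6)
              ++ (if (d.length : Int) - i ≥ 16 then "\n    " else ""))) := by
  induction n with
  | zero =>
      intro d m s h
      rw [pv_pyRange16_nil _ _ (by exact_mod_cast h), List.map_nil, pv_join_empty_nil,
        List.drop_of_length_le (by omega), String.append_empty]
      rfl
  | succ n ih =>
      intro d m s h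
      by_cases hend : d.length ≤ 16*m
      · rw [pv_pyRange16_nil _ _ (by exact_mod_cast hend), List.map_nil, pv_join_empty_nil,
          List.drop_of_length_le hend, String.append_empty]
        rfl
      · rw [not_le] at hend
        rw [pv_pyRange16_cons _ _ (by exact_mod_cast hend), List.map_cons, pv_join_empty_cons]
        have hslice : PySem.List.slice d (some ((16*m : Nat) : Int)) (some (((16*m : Nat) : Int) + 16))
            = (d.drop (16*m)).take 16 := by
          have h16 : (((16*m : Nat) : Int) + 16) = (((16*m : Nat) : Int) + ((16 : Nat) : Int)) := by
            push_cast; ring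
          rw [h16, PySem.List.slice_natCast_add]
        have hcast16 : ((16*m : Nat) : Int) + 16 = ((16*(m+1) : Nat) : Int) := by push_cast; ring
        rw [hslice, hcast16]
        by_cases hfull : 16 ≤ (d.drop (16*m)).length
        · have hdl : 16*m + 16 ≤ d.length := by
            have := List.length_drop (l := d) (i := 16*m); omega
          have hcond : (d.length : Int) - ((16*m : Nat) : Int) ≥ 16 := by
            push_cast; omega
          rw [if_pos hcond]
          have hrest : d.drop (16*m) = (d.drop (16*m)).take 16 ++ (d.drop (16*(m+1))) := by
            rw [show 16*(m+1) = 16*m + 16 by ring, ← List.drop_drop]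
            exact (List.take_append_drop 16 _).symm
          have hstep := pv_chunk_full m ((d.drop (16*m)).take 16) 0 (d.drop (16*(m+1))) s
            (by omega) (by simp [List.length_take]; omega)
          rw [Nat.add_zero] at hstep
          conv_lhs => rw [hrest]
          rw [hstep, ih d (m+1) _ (by omega)]
          simp [String.append_assoc]
        · rw [not_le] at hfull
          have hdl : d.length < 16*m + 16 := by
            have := List.length_drop (l := d) (i := 16*m); omega
          have hcond : ¬ ((d.length : Int) - ((16*m : Nat) : Int) ≥ 16) := by
            push_cast; omega
          rw [if_neg hcond]
          have htake : (d.drop (16*m)).take 16 = d.drop (16*m) :=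
            List.take_of_length_le (by omega)
          rw [htake, pv_pyRange16_nil _ _ (by exact_mod_cast (by omega : d.length ≤ 16*(m+1))),
            List.map_nil, pv_join_empty_nil]
          have hstep := pv_chunk_partial m (d.drop (16*m)) 0 s (by omega)
          rw [Nat.add_zero] at hstep
          rw [hstep, String.append_empty, String.append_empty]

-- ===== VERDICT (by name: the statement is the Claim_ definition above) =====
theorem int_block_spec : Claim_equal_int_block := by
  unfold Claim_equal_int_block
  intro d _
  unfold Spec_int_block int_block int_block_alt
  have hA := pv_loopA_eq d d.length 0 "  { " (by omega) (by omega)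
  have hB := pv_loop_eq_join d.length d 0 "  { " (by omega)
  rw [show (16*0 : Nat) = 0 from rfl] at hB
  exact congrArg (fun t => t ++ "}") (hA.trans hB)
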